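-- pv_equiv track=rewrite | github.com/ashikajain33/Python_DSA--More | kthSmallestMulti.py | KthSmallestMultiple
-- ===== SOURCE A (Python) =====
-- def KthSmallestMultiple(arr,k):
--     c=0
--     while k>len(arr)-1:
--         c+=1
--         k-=len(arr)
--     ans=1
--     while c > 0:
--         ans*=arr[k-1]
--         c-=1
--     return ans
-- ===== SOURCE B (Python) =====
-- def KthSmallestMultiple(arr, k):
--     n = len(arr)
--     if k <= n - 1:
--         return 1
--     c, r = divmod(k, n)
--     return arr[r - 1] ** c
-- ===== Notes on version B (the rewrite author's own statement) =====
-- stated objective: simpler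
-- what changed: Replaces the repeated-subtraction loop by one divmod and the c-fold multiplication loop by Python's built-in exponentiation **.
import Mathlib
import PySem

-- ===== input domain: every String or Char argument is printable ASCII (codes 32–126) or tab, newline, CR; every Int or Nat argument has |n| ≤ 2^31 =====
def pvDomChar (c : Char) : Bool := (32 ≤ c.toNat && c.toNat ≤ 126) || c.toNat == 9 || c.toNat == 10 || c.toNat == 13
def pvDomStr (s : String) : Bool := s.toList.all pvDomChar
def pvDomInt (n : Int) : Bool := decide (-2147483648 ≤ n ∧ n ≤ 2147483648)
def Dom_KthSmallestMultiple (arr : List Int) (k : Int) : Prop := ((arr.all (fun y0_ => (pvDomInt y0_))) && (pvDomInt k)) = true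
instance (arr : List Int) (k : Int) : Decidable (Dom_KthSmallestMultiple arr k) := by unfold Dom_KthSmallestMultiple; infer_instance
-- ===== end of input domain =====

-- B replaces A's repeated-subtraction loop by one divmod and A's multiplication loop by a single ** (objective: simpler).

-- ===== PORT A =====
-- first while loop: `while k > len(arr)-1: c += 1; k -= len(arr)`.
-- The `1 ≤ n` conjunct is ONLY a totality guard: with n = 0 and k ≥ 0 the Python loop
-- diverges (excluded by Pre_); it does not change the computation on any terminating run.
def kthLoop1 (n k c : Int) : Int × Int :=
  if h : 1 ≤ n ∧ k > n - 1 then kthLoop1 n (k - n) (c + 1) else (k, c)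
termination_by (k - (n - 1)).toNat
decreasing_by omega

-- second while loop: `while c > 0: ans *= arr[k-1]; c -= 1`.
-- arr[k-1] is Python indexing (negative allowed); whenever this loop runs in A the index
-- is in range, so the `.getD 0` default is never the returned value on inputs A returns on.
def kthLoop2 (arr : List Int) (k c ans : Int) : Int :=
  if c > 0 then kthLoop2 arr k (c - 1) (ans * (PySem.List.pyGet? arr (k - 1)).getD 0) else ans
termination_by c.toNat
decreasing_by omega

def KthSmallestMultiple (arr : List Int) (k : Int) : Int :=
  match kthLoop1 (arr.length : Int) k 0 with
  | (k', c) => kthLoop2 arr k' c 1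

-- ===== PORT B =====
-- Source B: early return 1; else c, r = divmod(k, n); arr[r-1] ** c (c ≥ 1 in this branch, so .toNat is exact)
def KthSmallestMultiple_alt (arr : List Int) (k : Int) : Int :=
  let n : Int := (arr.length : Int)
  if k ≤ n - 1 then 1
  else
    let c := PySem.Int.floordiv k n
    let r := PySem.Int.mod k n
    ((PySem.List.pyGet? arr (r - 1)).getD 0) ^ c.toNat

-- ===== PRECONDITION & SPEC =====
-- Pre_ excludes exactly arr = [] with k ≥ 0: there A's first while loop never terminates
-- (len(arr) = 0 is subtracted forever) and B raises ZeroDivisionError from divmod.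
def Pre_KthSmallestMultiple (arr : List Int) (k : Int) : Prop := arr ≠ [] ∨ k < 0
instance (arr : List Int) (k : Int) : Decidable (Pre_KthSmallestMultiple arr k) := by unfold Pre_KthSmallestMultiple; infer_instance
def pvWitness_KthSmallestMultiple : List Int × Int := ([2, 3], 7)

def Spec_KthSmallestMultiple (arr : List Int) (k : Int) (out : Int) : Prop := out = KthSmallestMultiple_alt arr k
instance (arr : List Int) (k : Int) (out : Int) : Decidable (Spec_KthSmallestMultiple arr k out) := by unfold Spec_KthSmallestMultiple; infer_instance

-- ===== CLAIM (what is proved, stated in full; the proofs are below) =====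
def Claim_equal_KthSmallestMultiple : Prop := ∀ (arr : List Int) (k : Int), Dom_KthSmallestMultiple arr k → Pre_KthSmallestMultiple arr k → Spec_KthSmallestMultiple arr k (KthSmallestMultiple arr k)

-- ===== LEMMAS AND PROOFS =====

theorem kthLoop1_eq (n k c : Int) (hn : 1 ≤ n) : 0 ≤ k → kthLoop1 n k c = (k % n, c + k / n) := by
  fun_induction kthLoop1 n k c with
  | case1 k c h ih =>
      intro hk
      rw [ih (by omega)]
      have h1 : (k - n) % n = k % n := Int.sub_emod_right k n
      have h2 : (k - n) / n = k / n + (-1) := by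
        have := Int.add_mul_ediv_right k (-1) (show n ≠ 0 by omega)
        simpa [sub_eq_add_neg, neg_mul] using this
      rw [h1, h2]; ring_nf
  | case2 k c h =>
      intro hk
      have hk' : k ≤ n - 1 := by by_contra hc; exact h ⟨hn, by omega⟩
      have hm : k % n = k := Int.emod_eq_of_lt hk (by omega)
      have hd : k / n = 0 := Int.ediv_eq_zero_of_lt hk (by omega)
      rw [hm, hd]; ring_nf

theorem kthLoop2_eq (arr : List Int) (k c ans : Int) :
    kthLoop2 arr k c ans = ans * ((PySem.List.pyGet? arr (k - 1)).getD 0) ^ c.toNat := by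
  fun_induction kthLoop2 arr k c ans with
  | case1 c ans h ih =>
      rw [ih]
      have : c.toNat = (c - 1).toNat + 1 := by omega
      rw [this, pow_succ]; ring
  | case2 c ans h =>
      have : c.toNat = 0 := by omega
      rw [this, pow_zero, mul_one]

theorem KthSmallestMultiple_spec : Claim_equal_KthSmallestMultiple := by
  intro arr k _ hpre
  unfold Spec_KthSmallestMultiple KthSmallestMultiple KthSmallestMultiple_alt
  set n : Int := (arr.length : Int) with hn
  by_cases h : k ≤ n - 1
  · -- loop never runs on either side
    have h1 : kthLoop1 n k 0 = (k, 0) := by rw [kthLoop1, dif_neg (by omega)]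
    rw [h1, if_pos h]
    show kthLoop2 arr k 0 1 = 1
    rw [kthLoop2_eq]; norm_num
  · -- k > n-1; Pre_ forces arr ≠ [] (else n = 0 and k ≥ 0 contradicts Pre_)
    have hn1 : 1 ≤ n := by
      rcases hpre with h1 | h1
      · have : arr.length ≠ 0 := by simpa using h1
        omega
      · omega
    have hk : 0 ≤ k := by omega
    have hpos : (0 : Int) < n := by omega
    have h1 : kthLoop1 n k 0 = (k % n, 0 + k / n) := kthLoop1_eq n k 0 hn1 hk
    rw [h1, if_neg h]
    show kthLoop2 arr (k % n) (0 + k / n) 1 = _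
    rw [kthLoop2_eq arr (k % n) (0 + k / n) 1, one_mul,
        PySem.Int.mod_eq_emod_of_pos hpos, PySem.Int.floordiv_eq_ediv_of_pos hpos]
    norm_num
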